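-- pv_equiv track=rewrite | github.com/Edumail31/ordermypdf | app/prompt_sanitizer.py | _has_known_tokens
-- ===== SOURCE A (Python) =====
-- KNOWN_ACTION_VERBS = {
--     "merge", "combine", "join", "split", "extract", "keep", "delete", "remove",
--     "compress", "reduce", "shrink", "small", "smaller", "tiny",
--     "convert", "change", "transform", "export",
--     "rotate", "turn", "flip",
--     "reorder", "reverse", "swap", "rearrange",
--     "watermark", "stamp",
--     "ocr", "scan", "searchable", "readable",
--     "enhance", "improve", "clarify", "sharpen", "fix",
--     "flatten", "optimize", "sanitize",
--     "clean", "blank", "duplicate",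
--     "number", "numbers", "page",
--     "text",
--     "merg", "mrge", "combin", "compres", "comprs", "comress",
--     "splt", "spill", "spilt", "splitt",
--     "delet", "remov", "rotat", "roate", "rotae",
--     "convrt", "cnvrt", "extrat", "extrac",
--     "enhace", "enhanc",
-- }
--
-- KNOWN_FILE_TYPES = {
--     "pdf", "docx", "doc", "word",
--     "png", "jpg", "jpeg", "image", "images", "img",
--     "txt", "text",
--     "zip",
--     "pfd", "pff", "dox", "dog", "docs", "wrod", "wrord",
--     "pngg", "jgp", "jepg", "jpge", "imag", "imge",
-- }
--
-- KNOWN_ALIASES = {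
--     "to docx", "to doc", "to word", "as docx", "as word",
--     "to pdf", "as pdf",
--     "to png", "to jpg", "to jpeg", "to img", "to image", "to images",
--     "as png", "as jpg", "as jpeg", "as img",
--     "to txt", "to text", "as txt",
--     "ocr", "compress", "merge", "split", "rotate", "flatten",
--     "enhance", "clean", "watermark",
--     "too docx", "too doc", "too pdf", "too word",
--     "too png", "too jpg", "too img",
--     "tto docx", "tto pdf", "tto png",
--     "2 docx", "2 pdf", "2 png", "2 word",
--     "to dox", "to dcox", "to doxx", "to pfd",
--     "compres", "comprs", "comress",
--     "splt", "splitt",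
--     "merg", "mrge",
--     "rotat", "roate",
--     "cnvrt", "convrt",
-- }
--
-- PURPOSE_KEYWORDS = {
--     "email", "whatsapp", "print", "web", "share", "upload", "send",
--     "smaller", "reduce", "shrink",
-- }
--
-- def _has_known_tokens(text: str) -> bool:
--     """Check if text contains any known action verbs or file types."""
--     text_lower = text.lower()
--
--     for verb in KNOWN_ACTION_VERBS:
--         if verb in text_lower:
--             return True
--
--     for ftype in KNOWN_FILE_TYPES:
--         if ftype in text_lower:
--             return True
--
--     for alias in KNOWN_ALIASES:
--         if alias in text_lower:
--             return True
--
--     for purpose in PURPOSE_KEYWORDS: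
--         if purpose in text_lower:
--             return True
--
--     return False
-- ===== SOURCE B (Python) =====
-- # All known tokens kept as one compact pipe-separated line table, split once at
-- # import into a single hash set; the matcher is one position-major left-to-right
-- # pass over the lowered text, looking each window of length 1..max-token-length
-- # up in that set.
-- _TOKEN_TABLE = (
--     "merge|combine|join|split|extract|keep|delete|remove|compress",
--     "reduce|shrink|small|smaller|tiny|convert|change|transform",
--     "export|rotate|turn|flip|reorder|reverse|swap|rearrange",
--     "watermark|stamp|ocr|scan|searchable|readable|enhance|improve",
--     "clarify|sharpen|fix|flatten|optimize|sanitize|clean|blank",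
--     "duplicate|number|numbers|page|text|merg|mrge|combin|compres",
--     "comprs|comress|splt|spill|spilt|splitt|delet|remov|rotat",
--     "roate|rotae|convrt|cnvrt|extrat|extrac|enhace|enhanc|pdf",
--     "docx|doc|word|png|jpg|jpeg|image|images|img|txt|text|zip|pfd",
--     "pff|dox|dog|docs|wrod|wrord|pngg|jgp|jepg|jpge|imag|imge",
--     "to docx|to doc|to word|as docx|as word|to pdf|as pdf|to png",
--     "to jpg|to jpeg|to img|to image|to images|as png|as jpg",
--     "as jpeg|as img|to txt|to text|as txt|ocr|compress|merge",
--     "split|rotate|flatten|enhance|clean|watermark|too docx",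
--     "too doc|too pdf|too word|too png|too jpg|too img|tto docx",
--     "tto pdf|tto png|2 docx|2 pdf|2 png|2 word|to dox|to dcox",
--     "to doxx|to pfd|compres|comprs|comress|splt|splitt|merg|mrge",
--     "rotat|roate|cnvrt|convrt|email|whatsapp|print|web|share",
--     "upload|send|smaller|reduce|shrink",
-- )
--
-- _ALL_TOKENS = frozenset(tok for line in _TOKEN_TABLE for tok in line.split("|"))
-- _MAX_LEN = max(len(p) for p in _ALL_TOKENS)
--
-- def _has_known_tokens(text: str) -> bool:
--     t = text.lower()
--     n = len(t)
--     for i in range(n):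
--         for L in range(1, _MAX_LEN + 1):
--             if t[i:i + L] in _ALL_TOKENS:
--                 return True
--     return False
-- ===== Notes on version B (the rewrite author's own statement) =====
-- stated objective: alternative
-- what changed: A scans pattern-major over four set literals (one substring search per token, ~137 of them); B stores all tokens in one pipe-separated table split once at import into a single hash set and makes one position-major pass over the text, looking each window of length 1..max-token-length up in that set.
import Mathlib
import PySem

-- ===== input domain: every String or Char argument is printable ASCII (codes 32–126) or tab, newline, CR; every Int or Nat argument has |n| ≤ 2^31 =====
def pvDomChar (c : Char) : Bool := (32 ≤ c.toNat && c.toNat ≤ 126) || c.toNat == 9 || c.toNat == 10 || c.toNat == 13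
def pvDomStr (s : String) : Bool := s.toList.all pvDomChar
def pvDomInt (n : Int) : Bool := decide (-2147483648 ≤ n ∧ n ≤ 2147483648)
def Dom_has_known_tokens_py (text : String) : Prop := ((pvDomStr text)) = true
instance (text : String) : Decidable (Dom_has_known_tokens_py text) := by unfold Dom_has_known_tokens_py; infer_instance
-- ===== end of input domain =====

-- B replaces A's pattern-major scan over four set literals (one substring search per
-- token) by a compact pipe-separated token table split once into a single hash set and
-- one position-major pass over the text, looking each bounded-length window up in that
-- set (objective: alternative algorithm, same result).

-- ===== PORT A =====
-- the four module-level token sets, as lists of their distinct elements in source order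
def pvVerbs : List String := [
  "merge", "combine", "join", "split", "extract", "keep", "delete", "remove",
  "compress", "reduce", "shrink", "small", "smaller", "tiny", "convert", "change",
  "transform", "export", "rotate", "turn", "flip", "reorder", "reverse", "swap",
  "rearrange", "watermark", "stamp", "ocr", "scan", "searchable", "readable", "enhance",
  "improve", "clarify", "sharpen", "fix", "flatten", "optimize", "sanitize", "clean",
  "blank", "duplicate", "number", "numbers", "page", "text", "merg", "mrge",
  "combin", "compres", "comprs", "comress", "splt", "spill", "spilt", "splitt",
  "delet", "remov", "rotat", "roate", "rotae", "convrt", "cnvrt", "extrat",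
  "extrac", "enhace", "enhanc"
]

def pvFtypes : List String := [
  "pdf", "docx", "doc", "word", "png", "jpg", "jpeg", "image",
  "images", "img", "txt", "text", "zip", "pfd", "pff", "dox",
  "dog", "docs", "wrod", "wrord", "pngg", "jgp", "jepg", "jpge",
  "imag", "imge"
]

def pvAliases : List String := [
  "to docx", "to doc", "to word", "as docx", "as word", "to pdf", "as pdf", "to png",
  "to jpg", "to jpeg", "to img", "to image", "to images", "as png", "as jpg", "as jpeg",
  "as img", "to txt", "to text", "as txt", "ocr", "compress", "merge", "split",
  "rotate", "flatten", "enhance", "clean", "watermark", "too docx", "too doc", "too pdf",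
  "too word", "too png", "too jpg", "too img", "tto docx", "tto pdf", "tto png", "2 docx",
  "2 pdf", "2 png", "2 word", "to dox", "to dcox", "to doxx", "to pfd", "compres",
  "comprs", "comress", "splt", "splitt", "merg", "mrge", "rotat", "roate",
  "cnvrt", "convrt"
]

def pvPurpose : List String := [
  "email", "whatsapp", "print", "web", "share", "upload", "send", "smaller",
  "reduce", "shrink"
]

-- A: four for-loops with early return, i.e. one 'any' per token set, in order
def has_known_tokens_py (text : String) : Bool :=
  let text_lower := PySem.Str.lower text
  (pvVerbs.any (fun verb => PySem.Str.isIn verb text_lower)) ||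
  (pvFtypes.any (fun ftype => PySem.Str.isIn ftype text_lower)) ||
  (pvAliases.any (fun als => PySem.Str.isIn als text_lower)) ||
  (pvPurpose.any (fun purpose => PySem.Str.isIn purpose text_lower))

-- ===== PORT B =====
-- _TOKEN_TABLE: all tokens, pipe-separated, one table line per tuple element
def pvTokenTable : List String := [
  "merge|combine|join|split|extract|keep|delete|remove|compress",
  "reduce|shrink|small|smaller|tiny|convert|change|transform",
  "export|rotate|turn|flip|reorder|reverse|swap|rearrange",
  "watermark|stamp|ocr|scan|searchable|readable|enhance|improve",
  "clarify|sharpen|fix|flatten|optimize|sanitize|clean|blank",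
  "duplicate|number|numbers|page|text|merg|mrge|combin|compres",
  "comprs|comress|splt|spill|spilt|splitt|delet|remov|rotat",
  "roate|rotae|convrt|cnvrt|extrat|extrac|enhace|enhanc|pdf",
  "docx|doc|word|png|jpg|jpeg|image|images|img|txt|text|zip|pfd",
  "pff|dox|dog|docs|wrod|wrord|pngg|jgp|jepg|jpge|imag|imge",
  "to docx|to doc|to word|as docx|as word|to pdf|as pdf|to png",
  "to jpg|to jpeg|to img|to image|to images|as png|as jpg",
  "as jpeg|as img|to txt|to text|as txt|ocr|compress|merge",
  "split|rotate|flatten|enhance|clean|watermark|too docx",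
  "too doc|too pdf|too word|too png|too jpg|too img|tto docx",
  "tto pdf|tto png|2 docx|2 pdf|2 png|2 word|to dox|to dcox",
  "to doxx|to pfd|compres|comprs|comress|splt|splitt|merg|mrge",
  "rotat|roate|cnvrt|convrt|email|whatsapp|print|web|share",
  "upload|send|smaller|reduce|shrink"
]

-- _ALL_TOKENS = frozenset(tok for line in _TOKEN_TABLE for tok in line.split("|"));
-- .getD [] only totalises split? for the literal nonempty separator
def pvAllTokens : PySem.Set String :=
  PySem.Set.ofList (pvTokenTable.flatMap (fun line => (PySem.Str.split? line "|").getD []))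

-- _MAX_LEN = max(len(p) for p in _ALL_TOKENS); .getD 0 only totalises max over the (nonempty) set
def pvMaxLen : Int := (PySem.List.max? (pvAllTokens.map PySem.Str.len) (fun x => x)).getD 0

def has_known_tokens_py_alt (text : String) : Bool :=
  let t := PySem.Str.lower text
  let n := PySem.Str.len t
  (PySem.List.pyRange 0 n 1).any (fun i =>
    (PySem.List.pyRange 1 (pvMaxLen + 1) 1).any (fun L =>
      PySem.Set.contains pvAllTokens (PySem.Str.slice t (some i) (some (i + L)))))

-- ===== PRECONDITION & SPEC =====
def Spec_has_known_tokens_py (text : String) (out : Bool) : Prop := out = has_known_tokens_py_alt text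
instance (text : String) (out : Bool) : Decidable (Spec_has_known_tokens_py text out) := by unfold Spec_has_known_tokens_py; infer_instance

-- ===== CLAIM (what is proved, stated in full; the proofs are below) =====
def Claim_equal_has_known_tokens_py : Prop := ∀ (text : String), Dom_has_known_tokens_py text → Spec_has_known_tokens_py text (has_known_tokens_py text)

-- ===== LEMMAS AND PROOFS =====

-- proof-side helpers: the concatenation of the four source lists, and a simple
-- structural splitter equal to PySem's fuel-based splitOn for the one-char separator
def pvParts : List String := pvVerbs ++ pvFtypes ++ pvAliases ++ pvPurpose

def pvSplit (pre : List Char) : List Char → List (List Char)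
  | [] => [pre]
  | c :: rest => if c = '|' then pre :: pvSplit [] rest else pvSplit (pre ++ [c]) rest

lemma go_eq : ∀ (fuel : Nat) (l cur : List Char) (acc : List (List Char)), l.length < fuel →
    PySem.Chars.splitOn.go ['|'] fuel l cur acc = acc.reverse ++ pvSplit cur.reverse l := by
  intro fuel
  induction fuel with
  | zero => intro l cur acc h; omega
  | succ fuel ih =>
    intro l cur acc h
    cases l with
    | nil => simp [PySem.Chars.splitOn.go, pvSplit]
    | cons c rest =>
      by_cases hc : c = '|'
      · subst hc
        have hpre : List.isPrefixOf ['|'] ('|' :: rest) = true := by simp [List.isPrefixOf]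
        rw [PySem.Chars.splitOn.go, if_pos hpre]
        simp only [List.length_singleton, List.drop_one, List.tail_cons]
        rw [ih rest [] (cur.reverse :: acc) (by simpa using Nat.lt_of_succ_lt_succ h)]
        simp [pvSplit]
      · have hpre : List.isPrefixOf ['|'] (c :: rest) = false := by
          simp [List.isPrefixOf]; intro hcc; exact absurd hcc.symm hc
        rw [PySem.Chars.splitOn.go, if_neg (by simp [hpre])]
        rw [ih rest (c :: cur) acc (by simpa using Nat.lt_of_succ_lt_succ h)]
        simp [pvSplit, hc]

lemma splitOn_eq (l : List Char) : PySem.Chars.splitOn l ['|'] = pvSplit [] l := by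
  rw [PySem.Chars.splitOn, go_eq _ _ _ _ (by omega)]
  simp

lemma pvSplit_free : ∀ (cs pre : List Char), '|' ∉ cs → pvSplit pre cs = [pre ++ cs] := by
  intro cs
  induction cs with
  | nil => intro pre _; simp [pvSplit]
  | cons c rest ih =>
    intro pre h
    have hc : c ≠ '|' := fun hh => h (by simp [hh])
    rw [pvSplit, if_neg hc, ih _ (fun hh => h (by simp [hh]))]
    simp

lemma pvSplit_append : ∀ (cs pre rest : List Char), '|' ∉ cs →
    pvSplit pre (cs ++ '|' :: rest) = (pre ++ cs) :: pvSplit [] rest := by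
  intro cs
  induction cs with
  | nil => intro pre rest _; simp [pvSplit]
  | cons c cs' ih =>
    intro pre rest h
    have hc : c ≠ '|' := fun hh => h (by simp [hh])
    rw [List.cons_append, pvSplit, if_neg hc, ih _ _ (fun hh => h (by simp [hh]))]
    simp

lemma pvSplit_join : ∀ (parts : List (List Char)), parts ≠ [] → (∀ p ∈ parts, '|' ∉ p) →
    pvSplit [] (PySem.Chars.join ['|'] parts) = parts := by
  intro parts
  induction parts with
  | nil => intro h; exact absurd rfl h
  | cons p rest ih =>
    intro _ hfree
    cases rest with
    | nil =>
      rw [PySem.Chars.join_singleton, pvSplit_free _ _ (hfree p (by simp))]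
      simp
    | cons q rest' =>
      rw [PySem.Chars.join_cons_cons]
      rw [List.append_assoc]
      rw [show (['|'] ++ PySem.Chars.join ['|'] (q :: rest')) =
            '|' :: PySem.Chars.join ['|'] (q :: rest') from rfl]
      rw [pvSplit_append _ _ _ (hfree p (by simp))]
      rw [ih (by simp) (fun r hr => hfree r (by simp [hr]))]
      simp

-- one table line splits back into exactly its pipe-free tokens
lemma line_split (line : String) (ps : List String)
    (h1 : line.toList = PySem.Chars.join ['|'] (ps.map String.toList))
    (h2 : ps ≠ []) (h3 : ∀ p ∈ ps.map String.toList, '|' ∉ p) :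
    (PySem.Str.split? line "|").getD [] = ps := by
  rw [PySem.Str.split?, PySem.Chars.split?]
  rw [show "|".toList = ['|'] from rfl]
  rw [if_neg (by simp)]
  simp only [Option.map_some, Option.getD_some]
  rw [splitOn_eq, h1, pvSplit_join _ (by simpa using h2) h3]
  simp [List.map_map, Function.comp_def]

set_option maxRecDepth 100000 in
set_option maxHeartbeats 4000000 in
lemma pvAllTokens_eq : pvAllTokens = PySem.Set.ofList pvParts := by
  have e1 : (PySem.Str.split? "merge|combine|join|split|extract|keep|delete|remove|compress" "|").getD [] = ["merge", "combine", "join", "split", "extract", "keep", "delete", "remove", "compress"] :=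
    line_split _ _ (by decide) (by simp) (by decide)
  have e2 : (PySem.Str.split? "reduce|shrink|small|smaller|tiny|convert|change|transform" "|").getD [] = ["reduce", "shrink", "small", "smaller", "tiny", "convert", "change", "transform"] :=
    line_split _ _ (by decide) (by simp) (by decide)
  have e3 : (PySem.Str.split? "export|rotate|turn|flip|reorder|reverse|swap|rearrange" "|").getD [] = ["export", "rotate", "turn", "flip", "reorder", "reverse", "swap", "rearrange"] :=
    line_split _ _ (by decide) (by simp) (by decide)
  have e4 : (PySem.Str.split? "watermark|stamp|ocr|scan|searchable|readable|enhance|improve" "|").getD [] = ["watermark", "stamp", "ocr", "scan", "searchable", "readable", "enhance", "improve"] :=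
    line_split _ _ (by decide) (by simp) (by decide)
  have e5 : (PySem.Str.split? "clarify|sharpen|fix|flatten|optimize|sanitize|clean|blank" "|").getD [] = ["clarify", "sharpen", "fix", "flatten", "optimize", "sanitize", "clean", "blank"] :=
    line_split _ _ (by decide) (by simp) (by decide)
  have e6 : (PySem.Str.split? "duplicate|number|numbers|page|text|merg|mrge|combin|compres" "|").getD [] = ["duplicate", "number", "numbers", "page", "text", "merg", "mrge", "combin", "compres"] :=
    line_split _ _ (by decide) (by simp) (by decide)
  have e7 : (PySem.Str.split? "comprs|comress|splt|spill|spilt|splitt|delet|remov|rotat" "|").getD [] = ["comprs", "comress", "splt", "spill", "spilt", "splitt", "delet", "remov", "rotat"] :=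
    line_split _ _ (by decide) (by simp) (by decide)
  have e8 : (PySem.Str.split? "roate|rotae|convrt|cnvrt|extrat|extrac|enhace|enhanc|pdf" "|").getD [] = ["roate", "rotae", "convrt", "cnvrt", "extrat", "extrac", "enhace", "enhanc", "pdf"] :=
    line_split _ _ (by decide) (by simp) (by decide)
  have e9 : (PySem.Str.split? "docx|doc|word|png|jpg|jpeg|image|images|img|txt|text|zip|pfd" "|").getD [] = ["docx", "doc", "word", "png", "jpg", "jpeg", "image", "images", "img", "txt", "text", "zip", "pfd"] :=
    line_split _ _ (by decide) (by simp) (by decide)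
  have e10 : (PySem.Str.split? "pff|dox|dog|docs|wrod|wrord|pngg|jgp|jepg|jpge|imag|imge" "|").getD [] = ["pff", "dox", "dog", "docs", "wrod", "wrord", "pngg", "jgp", "jepg", "jpge", "imag", "imge"] :=
    line_split _ _ (by decide) (by simp) (by decide)
  have e11 : (PySem.Str.split? "to docx|to doc|to word|as docx|as word|to pdf|as pdf|to png" "|").getD [] = ["to docx", "to doc", "to word", "as docx", "as word", "to pdf", "as pdf", "to png"] :=
    line_split _ _ (by decide) (by simp) (by decide)
  have e12 : (PySem.Str.split? "to jpg|to jpeg|to img|to image|to images|as png|as jpg" "|").getD [] = ["to jpg", "to jpeg", "to img", "to image", "to images", "as png", "as jpg"] :=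
    line_split _ _ (by decide) (by simp) (by decide)
  have e13 : (PySem.Str.split? "as jpeg|as img|to txt|to text|as txt|ocr|compress|merge" "|").getD [] = ["as jpeg", "as img", "to txt", "to text", "as txt", "ocr", "compress", "merge"] :=
    line_split _ _ (by decide) (by simp) (by decide)
  have e14 : (PySem.Str.split? "split|rotate|flatten|enhance|clean|watermark|too docx" "|").getD [] = ["split", "rotate", "flatten", "enhance", "clean", "watermark", "too docx"] :=
    line_split _ _ (by decide) (by simp) (by decide)
  have e15 : (PySem.Str.split? "too doc|too pdf|too word|too png|too jpg|too img|tto docx" "|").getD [] = ["too doc", "too pdf", "too word", "too png", "too jpg", "too img", "tto docx"] :=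
    line_split _ _ (by decide) (by simp) (by decide)
  have e16 : (PySem.Str.split? "tto pdf|tto png|2 docx|2 pdf|2 png|2 word|to dox|to dcox" "|").getD [] = ["tto pdf", "tto png", "2 docx", "2 pdf", "2 png", "2 word", "to dox", "to dcox"] :=
    line_split _ _ (by decide) (by simp) (by decide)
  have e17 : (PySem.Str.split? "to doxx|to pfd|compres|comprs|comress|splt|splitt|merg|mrge" "|").getD [] = ["to doxx", "to pfd", "compres", "comprs", "comress", "splt", "splitt", "merg", "mrge"] :=
    line_split _ _ (by decide) (by simp) (by decide)
  have e18 : (PySem.Str.split? "rotat|roate|cnvrt|convrt|email|whatsapp|print|web|share" "|").getD [] = ["rotat", "roate", "cnvrt", "convrt", "email", "whatsapp", "print", "web", "share"] :=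
    line_split _ _ (by decide) (by simp) (by decide)
  have e19 : (PySem.Str.split? "upload|send|smaller|reduce|shrink" "|").getD [] = ["upload", "send", "smaller", "reduce", "shrink"] :=
    line_split _ _ (by decide) (by simp) (by decide)
  rw [pvAllTokens]
  simp only [pvTokenTable, List.flatMap_cons, List.flatMap_nil, e1, e2, e3, e4, e5, e6, e7, e8, e9, e10, e11, e12, e13, e14, e15, e16, e17, e18, e19, List.append_nil]
  rfl

set_option maxRecDepth 100000 in
set_option maxHeartbeats 1000000 in
lemma pvMaxLen_eq : pvMaxLen = 10 := by
  have h : pvMaxLen = (PySem.List.max? ((PySem.Set.ofList pvParts).map PySem.Str.len) (fun x => x)).getD 0 := by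
    rw [pvMaxLen, pvAllTokens_eq]
  rw [h]; decide

lemma mem_pvAllTokens (p : String) :
    p ∈ pvAllTokens ↔ p ∈ pvVerbs ∨ p ∈ pvFtypes ∨ p ∈ pvAliases ∨ p ∈ pvPurpose := by
  simp [pvAllTokens_eq, PySem.Set.mem_ofList, pvParts]

set_option maxRecDepth 100000 in
set_option maxHeartbeats 1000000 in
lemma pvAllTokens_bounds : ∀ p ∈ pvAllTokens, p.toList ≠ [] ∧ p.toList.length ≤ 10 := by
  rw [pvAllTokens_eq]; decide

-- A is true iff some token (from any of the four sets) is an infix of the lowered text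
lemma hkA_iff (text : String) :
    has_known_tokens_py text = true ↔
      ∃ p ∈ pvAllTokens, p.toList <:+: (PySem.Str.lower text).toList := by
  simp only [has_known_tokens_py, Bool.or_eq_true, List.any_eq_true,
    PySem.Str.isIn_iff_infix]
  constructor
  · rintro (((⟨p, hp, h⟩ | ⟨p, hp, h⟩) | ⟨p, hp, h⟩) | ⟨p, hp, h⟩) <;>
      exact ⟨p, (mem_pvAllTokens p).mpr (by tauto), h⟩
  · rintro ⟨p, hp, h⟩
    rcases (mem_pvAllTokens p).mp hp with h1 | h1 | h1 | h1
    · exact Or.inl (Or.inl (Or.inl ⟨p, h1, h⟩))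
    · exact Or.inl (Or.inl (Or.inr ⟨p, h1, h⟩))
    · exact Or.inl (Or.inr ⟨p, h1, h⟩)
    · exact Or.inr ⟨p, h1, h⟩

-- B is true iff some in-range window of length 1..10 of the lowered text is a token
lemma hkB_iff (text : String) :
    has_known_tokens_py_alt text = true ↔
      ∃ i : Int, (0 ≤ i ∧ i < PySem.Str.len (PySem.Str.lower text)) ∧
        ∃ L : Int, (1 ≤ L ∧ L < 11) ∧
          PySem.Str.slice (PySem.Str.lower text) (some i) (some (i + L)) ∈ pvAllTokens := by
  simp only [has_known_tokens_py_alt, List.any_eq_true, PySem.List.mem_pyRange_one,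
    pvMaxLen_eq, PySem.Set.contains_iff]
  constructor
  · rintro ⟨i, hi, L, hL, h⟩; exact ⟨i, hi, L, by omega, h⟩
  · rintro ⟨i, hi, L, hL, h⟩; exact ⟨i, hi, L, by omega, h⟩

theorem hk_eq (text : String) : has_known_tokens_py text = has_known_tokens_py_alt text := by
  rw [Bool.eq_iff_iff, hkA_iff, hkB_iff]
  constructor
  · rintro ⟨p, hp, hinf⟩
    obtain ⟨hne, hlen⟩ := pvAllTokens_bounds p hp
    obtain ⟨j, hpre⟩ := (PySem.Chars.exists_prefix_drop_iff_isIn p.toList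
        (PySem.Str.lower text).toList).mpr ((PySem.Chars.isIn_iff_infix _ _).mpr hinf)
    have hjlt : j < (PySem.Str.lower text).toList.length := by
      by_contra hge
      rw [List.drop_eq_nil_of_le (by omega)] at hpre
      exact hne (List.prefix_nil.mp hpre)
    refine ⟨(j : Int), ⟨by positivity, by rw [PySem.Str.len_eq]; exact_mod_cast hjlt⟩,
      (p.toList.length : Int), ⟨by exact_mod_cast (List.length_pos_iff.mpr hne), by exact_mod_cast (by omega : p.toList.length < 11)⟩, ?_⟩
    have hslice : (PySem.Str.slice (PySem.Str.lower text) (some (j : Int))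
        (some ((j : Int) + (p.toList.length : Int)))).toList = p.toList := by
      rw [PySem.Str.toList_slice, PySem.Chars.slice_eq_listSlice, PySem.List.slice_natCast_add]
      exact (List.prefix_iff_eq_take.mp hpre).symm
    rwa [String.toList_inj.mp hslice]
  · rintro ⟨i, ⟨hi0, hin⟩, L, ⟨hL1, _⟩, hmem⟩
    refine ⟨_, hmem, ?_⟩
    rw [PySem.Str.toList_slice, PySem.Chars.slice_eq_listSlice, PySem.List.slice_toNat _ hi0 (by omega)]
    exact ((List.take_prefix _ _).isInfix).trans (List.drop_suffix _ _).isInfix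

-- ===== VERDICT (by name: the statement is the Claim_ definition above) =====
theorem has_known_tokens_py_spec : Claim_equal_has_known_tokens_py := by
  intro text _
  exact hk_eq text
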